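-- pv_equiv track=rewrite | github.com/HujiAnni/Controlling-Program-Flow | While-Loop/funcs-skip.py | skip
-- ===== SOURCE A (Python) =====
-- def skip(s,n):
--     """
--     Returns a copy of s, only including positions that are multiples of n
--
--     A position is a multiple of n if pos % n == 0.
--
--     Examples:
--         skip('hello world',1) returns 'hello world'
--         skip('hello world',2) returns 'hlowrd'
--         skip('hello world',3) returns 'hlwl'
--         skip('hello world',4) returns 'hor'
--
--     Parameter s: the string to copy
--     Precondition: s is a nonempty string
--
--     Parameter n: the letter positions to accept
--     Precondition: n is an int > 0
--     """
--     # You must use a while-loop, not a for-loop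
--     pos=0
--     s_=''
--     while pos<len(s):
--         if pos % n==0:
--             s_+=s[pos]
--         pos+=1
--
--     return s_
-- ===== SOURCE B (Python) =====
-- def skip(s, n):
--     # Pre_ excludes n <= 0 (outside the documented precondition n > 0):
--     # there A raises (n == 0, nonempty s) or returns a Python-modulo accident (n < 0).
--     # Build the result directly from the kept positions: a strided range, then join.
--     return ''.join(s[pos] for pos in range(0, len(s), n))
-- ===== Notes on version B (the rewrite author's own statement) =====
-- stated objective: faster
-- what changed: B generates the kept indices directly with range(0, len(s), n) and joins the picked characters, instead of A's while-loop over every index with a pos % n == 0 test and string concatenation; Pre_ excludes n <= 0 (outside the documented precondition n > 0), where A raises ZeroDivisionError or returns an accidental Python-modulo value.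
-- outside the precondition, e.g. on skip('ab', -1): A returns 'ab', B returns ''; on skip('', 0): A returns '', B raises ValueError
import Mathlib
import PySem

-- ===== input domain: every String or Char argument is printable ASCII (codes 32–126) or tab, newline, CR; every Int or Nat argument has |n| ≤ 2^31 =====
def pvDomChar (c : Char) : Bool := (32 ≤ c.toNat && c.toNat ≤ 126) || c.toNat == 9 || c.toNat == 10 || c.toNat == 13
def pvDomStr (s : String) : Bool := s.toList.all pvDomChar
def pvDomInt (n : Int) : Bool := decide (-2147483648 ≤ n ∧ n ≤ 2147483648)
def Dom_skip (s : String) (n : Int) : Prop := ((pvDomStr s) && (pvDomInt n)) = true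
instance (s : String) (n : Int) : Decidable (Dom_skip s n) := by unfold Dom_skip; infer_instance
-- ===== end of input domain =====

-- B builds the result directly from the kept indices (range(0, len, n), then join of the
-- picked characters) instead of A's scan of every index with a pos % n == 0 test;
-- Pre_skip restricts to the documented precondition n > 0 (plus the trivial empty string
-- with n ≠ 0): for n = 0 A raises on nonempty s (and B raises even on ""), for n < 0
-- A's value is an accident of Python's modulo while B returns "".


-- ===== PORT A =====
-- A's while-loop: scan every pos from 0, keep s[pos] when pos % n == 0.
def skipLoop (cs : List Char) (n : Int) (pos : Nat) (acc : List Char) : List Char :=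
  if h : pos < cs.length then
    skipLoop cs n (pos + 1)
      (if PySem.Int.mod (pos : Int) n = 0 then acc ++ [cs[pos]] else acc)
  else acc
termination_by cs.length - pos

def skip (s : String) (n : Int) : String :=
  String.ofList (skipLoop s.toList n 0 [])

-- ===== PORT B =====
-- B: ''.join(s[pos] for pos in range(0, len(s), n)) — generate the kept indices, pick, join.
def skip_alt (s : String) (n : Int) : String :=
  PySem.Str.join ""
    ((PySem.List.pyRange 0 (PySem.Str.len s) n).map
      (fun i => match PySem.Str.pyGet? s i with
        | some c => String.ofList [c]
        | none => ""))

-- ===== PRECONDITION & SPEC =====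
-- Pre_skip: the documented precondition n > 0, plus the empty string with n ≠ 0 (both
-- trivially return "").  Excluded although A returns there: n < 0 on nonempty s (A's
-- Python-modulo accident; B returns "") and ("", 0) (A returns "", B raises ValueError);
-- also excluded: n = 0 on nonempty s, where both raise.
def Pre_skip (s : String) (n : Int) : Prop := 0 < n ∨ (s = "" ∧ n ≠ 0)
instance (s : String) (n : Int) : Decidable (Pre_skip s n) := by unfold Pre_skip; infer_instance
def pvWitness_skip : String × Int := ("hello world", 3)

def Spec_skip (s : String) (n : Int) (out : String) : Prop := out = skip_alt s n
instance (s : String) (n : Int) (out : String) : Decidable (Spec_skip s n out) := by unfold Spec_skip; infer_instance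

-- ===== CLAIM (what is proved, stated in full; the proofs are below) =====
def Claim_equal_skip : Prop := ∀ (s : String) (n : Int), Dom_skip s n → Pre_skip s n → Spec_skip s n (skip s n)

-- ===== LEMMAS AND PROOFS =====

-- ''.join = flatten
theorem join_empty_flatten (lss : List (List Char)) :
    PySem.Chars.join [] lss = lss.flatten := by
  induction lss with
  | nil => simp [PySem.Chars.join_nil]
  | cons p rest ih =>
    cases rest with
    | nil => simp [PySem.Chars.join_singleton]
    | cons q rest' =>
      rw [PySem.Chars.join_cons_cons]
      simp only [List.flatten_cons] at ih ⊢
      rw [ih]; simp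

-- pyRange with a positive step: induction forms.
theorem pyRange_pos_nil (a b s : Int) (hs : 0 < s) (h : b ≤ a) :
    PySem.List.pyRange a b s = [] := by
  rw [PySem.List.pyRange_of_pos a b hs, if_neg (by omega)]
  simp

theorem pyRange_pos_cons (a b s : Int) (hs : 0 < s) (h : a < b) :
    PySem.List.pyRange a b s = a :: PySem.List.pyRange (a + s) b s := by
  rw [PySem.List.pyRange_of_pos a b hs, PySem.List.pyRange_of_pos (a + s) b hs, if_pos h]
  have hq0 : 0 ≤ (b - a - 1) / s := Int.ediv_nonneg (by omega) (by omega)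
  have key : (b - a + s - 1) / s = (b - a - 1) / s + 1 := by
    have e : b - a + s - 1 = (b - a - 1) + 1 * s := by ring
    rw [e, Int.add_mul_ediv_right _ _ (by omega)]
  have hcount2 : (if a + s < b then ((b - (a + s) + s - 1) / s).toNat else 0)
      = ((b - a - 1) / s).toNat := by
    split
    · congr 1; ring_nf
    · have : (b - a - 1) / s = 0 := Int.ediv_eq_zero_of_lt (by omega) (by omega)
      omega
  rw [hcount2, key]
  have htn : ((b - a - 1) / s + 1).toNat = ((b - a - 1) / s).toNat + 1 := by omega
  rw [htn, List.range_succ_eq_map, List.map_cons, List.map_map]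
  congr 1
  · simp
  · apply List.map_congr_left
    intro k _
    simp [Nat.succ_eq_add_one]
    ring

-- A's modulo test at a nonnegative position, positive divisor: it is divisibility of pos by n.
theorem pyMod_pos_eq_zero_iff (pos k : Nat) (n : Int) (hn : (n : Int) = (k : Nat)) :
    (PySem.Int.mod (pos : Int) n = 0) ↔ pos % k = 0 := by
  subst hn
  rw [PySem.Int.mod_eq_zero_iff_dvd, Int.natCast_dvd_natCast]
  omega

-- Skipping A's loop across the n-1 rejected positions after a kept multiple of n.
theorem skipLoop_skip_between (cs : List Char) (n : Int) (k : Nat) (hn : n = (k : Int)) :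
    ∀ d j pos acc, k ≤ j + d → 1 ≤ j → j ≤ k → pos % k = 0 →
      skipLoop cs n (pos + j) acc = skipLoop cs n (pos + k) acc := by
  intro d
  induction d with
  | zero =>
    intro j pos acc hd _ hjk _
    have : j = k := by omega
    subst this; rfl
  | succ d ih =>
    intro j pos acc hd h1 hjk hpos
    rcases eq_or_lt_of_le hjk with rfl | hlt
    · rfl
    · rw [skipLoop]
      split
      · have hjmod : (pos + j) % k = j := by
          rw [Nat.add_mod, hpos, Nat.zero_add, Nat.mod_mod_of_dvd _ dvd_rfl,
              Nat.mod_eq_of_lt hlt]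
        have hmod : ¬ (PySem.Int.mod ((pos + j : Nat) : Int) n = 0) := by
          rw [pyMod_pos_eq_zero_iff _ k n hn]
          omega
        rw [if_neg hmod]
        have := ih (j + 1) pos acc (by omega) (by omega) (by omega) hpos
        simpa [Nat.add_assoc] using this
      · rw [skipLoop, dif_neg (by omega)]

-- Main correspondence: from any multiple of n, A's scan equals the flattened picks of
-- B's strided range.
theorem skipLoop_eq_range (cs : List Char) (n : Int) (k : Nat) (hn : n = (k : Int))
    (hk : 0 < k) :
    ∀ d pos acc, cs.length - pos ≤ d → pos % k = 0 →
      skipLoop cs n pos acc = acc ++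
        ((PySem.List.pyRange (pos : Int) (cs.length : Int) n).map
          (fun i => (PySem.List.pyGet? cs i).toList)).flatten := by
  intro d
  induction d with
  | zero =>
    intro pos acc hd _
    rw [skipLoop, dif_neg (by omega),
        pyRange_pos_nil _ _ n (by omega) (by exact_mod_cast by omega)]
    simp
  | succ d ih =>
    intro pos acc hd hpos
    rw [skipLoop]
    split
    · rename_i h
      have hmod : PySem.Int.mod ((pos : Nat) : Int) n = 0 := by
        rw [pyMod_pos_eq_zero_iff _ k n hn]; exact hpos
      rw [if_pos hmod]
      rw [skipLoop_skip_between cs n k hn (k - 1) 1 pos (acc ++ [cs[pos]])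
            (by omega) le_rfl hk hpos]
      have hcast : ((pos : Int) + n) = (((pos + k : Nat) : Nat) : Int) := by
        subst hn; push_cast; ring
      rw [pyRange_pos_cons (pos : Int) (cs.length : Int) n (by omega)
            (by exact_mod_cast h), hcast,
          ih (pos + k) (acc ++ [cs[pos]]) (by omega)
            (by rw [Nat.add_mod_right]; exact hpos)]
      have hget : PySem.List.pyGet? cs ((pos : Nat) : Int) = some cs[pos] :=
        PySem.List.pyGet?_ofNat cs pos h
      simp [hget]
    · rw [pyRange_pos_nil _ _ n (by omega) (by exact_mod_cast by omega)]
      simp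

-- The two top-level wrappers agree once their character lists do.
theorem skip_alt_toList (s : String) (n : Int) :
    (skip_alt s n).toList =
      ((PySem.List.pyRange 0 ((s.toList.length : Nat) : Int) n).map
        (fun i => (PySem.List.pyGet? s.toList i).toList)).flatten := by
  unfold skip_alt
  rw [PySem.Str.toList_join, List.map_map]
  have hmap : (String.toList ∘ fun i => match PySem.Str.pyGet? s i with
        | some c => String.ofList [c]
        | none => "")
      = fun i => (PySem.List.pyGet? s.toList i).toList := by
    funext i
    simp only [Function.comp]
    have hg : PySem.Str.pyGet? s i = PySem.List.pyGet? s.toList i := by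
      simp [PySem.Str.pyGet?_eq]
    rw [hg]
    cases PySem.List.pyGet? s.toList i <;> simp
  rw [(by simp : "".toList = ([] : List Char)), hmap, join_empty_flatten]
  simp [PySem.Str.len]

-- ===== VERDICT (by name: the statement is the Claim_ definition above) =====
theorem skip_spec : Claim_equal_skip := by
  intro s n _ hpre
  unfold Spec_skip skip
  rcases hpre with hn0 | ⟨hs, hne⟩
  · have hk : n = ((n.toNat : Nat) : Int) := by omega
    have hL := skipLoop_eq_range s.toList n n.toNat hk (by omega) s.toList.length 0 []
        (by omega) (Nat.zero_mod _)
    rw [List.nil_append] at hL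
    simp only [Nat.cast_zero] at hL
    rw [hL, ← skip_alt_toList, String.ofList_toList]
  · subst hs
    have h0 : skipLoop "".toList n 0 [] = [] := by
      rw [skipLoop]; simp
    rw [h0]
    unfold skip_alt
    have hlen : PySem.Str.len "" = 0 := by simp [PySem.Str.len]
    rw [hlen]
    have hz : PySem.List.pyRange 0 0 n = [] := by
      simp [PySem.List.pyRange]
    rw [hz]
    simp [PySem.Str.join]
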